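-- pv_equiv track=rewrite | github.com/LeoLLM/code-review-assistant-2 | review_logic.py | _parse_template
-- ===== SOURCE A (Python) =====
-- from typing import List, Dict, Any, Optional, Tuple
--
-- def _parse_template(content: str) -> Dict[str, List[str]]:
--     """
--     Parse a markdown template into structured sections
--
--     Args:
--         content: Markdown content to parse
--
--     Returns:
--         Dictionary with section names as keys and lists of checklist items
--     """
--     sections = {}
--     current_section = None
--
--     for line in content.split('\n'):
--         if line.startswith('## '):
--             # New section
--             current_section = line[3:].strip()
--             sections[current_section] = []
--         elif line.startswith('- [ ] ') and current_section:
--             # Checklist item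
--             item = line[6:].strip()
--             sections[current_section].append(item)
--
--     return sections
-- ===== SOURCE B (Python) =====
-- def _parse_template(content):
--     """Parse a markdown template into sections of checklist items.
--
--     Block-at-a-time decomposition: the outer loop finds each section header,
--     an inner loop collects that header's checklist items up to the next
--     header, and the section is assigned with a single dict store.
--     """
--     lines = content.split('\n')
--     sections = {}
--     n = len(lines)
--     k = 0
--     while k < n:
--         line = lines[k]
--         k += 1
--         if line.startswith('## '):
--             name = line[3:].strip()
--             items = []
--             while k < n and not lines[k].startswith('## '):
--                 if lines[k].startswith('- [ ] '):
--                     items.append(lines[k][6:].strip())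
--                 k += 1
--             sections[name] = items
--     return sections
-- ===== Notes on version B (the rewrite author's own statement) =====
-- stated objective: alternative
-- what changed: B replaces A's flat per-line state machine (current-section variable, dict mutated line by line) with a block-at-a-time nested loop: the outer loop finds each markdown section header and an inner loop collects that header's checklist items before a single dict assignment.
-- intended difference: On inputs whose last empty-named markdown header (a header line whose name strips to nothing) is followed by checklist items before the next header, A returns an empty list for that section (the falsy section name silently blocks every append) while B returns those items, which is the intended parse of the block. — e.g. on _parse_template("## \n- [ ] x"): A returns [("", [])], B returns [("", ["x"])]
import Mathlib
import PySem

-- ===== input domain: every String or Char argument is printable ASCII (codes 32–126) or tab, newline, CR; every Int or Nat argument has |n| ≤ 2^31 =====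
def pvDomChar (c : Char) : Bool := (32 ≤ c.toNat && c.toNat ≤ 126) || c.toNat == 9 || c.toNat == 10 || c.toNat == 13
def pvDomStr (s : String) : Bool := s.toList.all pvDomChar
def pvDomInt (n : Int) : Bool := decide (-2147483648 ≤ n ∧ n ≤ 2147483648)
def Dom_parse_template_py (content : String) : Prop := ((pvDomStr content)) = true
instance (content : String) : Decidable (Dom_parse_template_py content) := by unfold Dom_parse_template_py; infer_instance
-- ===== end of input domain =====

-- B replaces A's per-line state machine by a block-at-a-time nested loop (one dict
-- assignment per header); objective: alternative decomposition, same cost.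

-- ===== PORT A =====
-- truthiness of Python's `current_section` (None or str): None and '' are falsy
def pvTruthy (cur : Option String) : Bool :=
  match cur with
  | none => false
  | some s => !(s == "")

-- one iteration of A's for-loop; state = (sections, current_section).
-- `sections[current_section].append(item)` is ported as Dict.modify with default []:
-- the key is always present when the branch fires (a header insert precedes), so the
-- default is never used.
def pvAStep (st : PySem.Dict String (List String) × Option String) (line : String) :
    PySem.Dict String (List String) × Option String :=
  if PySem.Str.startswith line "## " then
    let name := PySem.Str.strip (PySem.Str.slice line (some 3) none)
    (st.1.insert name [], some name)
  else if PySem.Str.startswith line "- [ ] " && pvTruthy st.2 then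
    let item := PySem.Str.strip (PySem.Str.slice line (some 6) none)
    (st.1.modify (st.2.getD "") [] (· ++ [item]), st.2)
  else st

-- content.split('\n'): separator is nonempty, so split? never returns none
def parse_template_py (content : String) : List (String × List String) :=
  (((PySem.Str.split? content "\n").getD []).foldl pvAStep (PySem.Dict.empty, none)).1.items

-- ===== PORT B =====
-- inner while-loop of B: consume body lines up to the next header, collecting items
def pvBInner : List String → List String → List String × List String
  | [], items => (items, [])
  | l :: ls, items =>
    if PySem.Str.startswith l "## " then (items, l :: ls)
    else pvBInner ls (if PySem.Str.startswith l "- [ ] "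
        then items ++ [PySem.Str.strip (PySem.Str.slice l (some 6) none)] else items)

-- (termination measure for the outer loop)
theorem pvBInner_len : ∀ (ls items : List String), (pvBInner ls items).2.length ≤ ls.length := by
  intro ls
  induction ls with
  | nil => intro items; simp [pvBInner]
  | cons l ls ih =>
    intro items
    by_cases h : PySem.Str.startswith l "## " = true
    · simp [pvBInner, h, -PySem.Str.startswith_eq]
    · simp only [pvBInner, Bool.not_eq_true] at h ⊢
      rw [h]
      simpa using Nat.le_succ_of_le (ih _)

-- outer while-loop of B
def pvBGo : List String → PySem.Dict String (List String) → PySem.Dict String (List String)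
  | [], d => d
  | l :: ls, d =>
    if PySem.Str.startswith l "## " then
      let name := PySem.Str.strip (PySem.Str.slice l (some 3) none)
      let r := pvBInner ls []
      pvBGo r.2 (d.insert name r.1)
    else pvBGo ls d
termination_by ls _ => ls.length
decreasing_by
  · exact Nat.lt_succ_of_le (pvBInner_len ls [])
  · exact Nat.lt_succ_self _

def parse_template_py_alt (content : String) : List (String × List String) :=
  (pvBGo ((PySem.Str.split? content "\n").getD []) PySem.Dict.empty).items

-- ===== PRECONDITION & SPEC =====
-- the one line shape D_ talks about: a '## ' header whose name strips to nothing
def pvEmptyHdrC (l : List Char) : Bool :=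
  l.take 3 == "## ".toList && (l.drop 3).all PySem.Chars.isspace

-- On inputs whose last empty-named markdown header (a header line whose name strips
-- to nothing) is followed by checklist items before the next header, A returns an
-- empty list for that section (the falsy section name silently blocks every append)
-- while B returns those items, which is the intended parse of the block.
def D_parse_template_py (content : String) : Prop :=
  (fun L => L.any pvEmptyHdrC &&
    ((L.reverse.takeWhile (!pvEmptyHdrC ·)).reverse.takeWhile
      (·.take 3 != "## ".toList)).any (·.take 6 == "- [ ] ".toList))
    (content.toList.splitOn '\n')
instance (content : String) : Decidable (D_parse_template_py content) := by unfold D_parse_template_py; infer_instance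

def Spec_parse_template_py (content : String) (out : List (String × List String)) : Prop :=
  ¬ D_parse_template_py content → out = parse_template_py_alt content
instance (content : String) (out : List (String × List String)) : Decidable (Spec_parse_template_py content out) := by unfold Spec_parse_template_py; infer_instance

def pvDiffWitness_parse_template_py : String := "## \n- [ ] x"
def pvDiffWitnessOut_parse_template_py : (List (String × List String)) × (List (String × List String)) :=
  ([("", [])], [("", ["x"])])

-- ===== CLAIM (what is proved, stated in full; the proofs are below) =====
def Claim_unchanged_parse_template_py : Prop := ∀ (content : String), Dom_parse_template_py content → Spec_parse_template_py content (parse_template_py content)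
def Claim_changed_parse_template_py : Prop := Dom_parse_template_py (pvDiffWitness_parse_template_py) ∧ D_parse_template_py (pvDiffWitness_parse_template_py) ∧ parse_template_py (pvDiffWitness_parse_template_py) = pvDiffWitnessOut_parse_template_py.1 ∧ parse_template_py_alt (pvDiffWitness_parse_template_py) = pvDiffWitnessOut_parse_template_py.2 ∧ pvDiffWitnessOut_parse_template_py.1 ≠ pvDiffWitnessOut_parse_template_py.2
def Claim_exact_parse_template_py : Prop := ∀ (content : String), Dom_parse_template_py content → D_parse_template_py content → parse_template_py content ≠ parse_template_py_alt content

-- ===== LEMMAS AND PROOFS =====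

-- recursive form of D_'s scan, and its agreement with the combinator form
def pvItemB4C : List (List Char) → Bool
  | [] => false
  | l :: ls => l.take 3 != "## ".toList && (l.take 6 == "- [ ] ".toList || pvItemB4C ls)
def pvBadC : List (List Char) → Bool
  | [] => false
  | l :: ls => if pvEmptyHdrC l && !ls.any pvEmptyHdrC then pvItemB4C ls else pvBadC ls

theorem pvItemB4C_eq (ls : List (List Char)) :
    pvItemB4C ls = (ls.takeWhile (fun l => l.take 3 != "## ".toList)).any
      (fun l => l.take 6 == "- [ ] ".toList) := by
  induction ls with
  | nil => rfl
  | cons l ls ih =>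
    rw [pvItemB4C, List.takeWhile_cons]
    by_cases h : (l.take 3 != "## ".toList) = true
    · rw [if_pos h, List.any_cons, h, Bool.true_and, ih]
    · simp only [Bool.not_eq_true] at h
      rw [if_neg (by rw [h]; simp), h, Bool.false_and]
      rfl

theorem pvBadC_no_empty (ls : List (List Char)) (h : ls.any pvEmptyHdrC = false) :
    pvBadC ls = false := by
  induction ls with
  | nil => rfl
  | cons l ls ih =>
    rw [List.any_cons, Bool.or_eq_false_iff] at h
    rw [pvBadC, h.1, Bool.false_and]
    simp only [Bool.false_eq_true, if_false]
    exact ih h.2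

theorem pvBadC_eq (ls : List (List Char)) :
    (ls.any pvEmptyHdrC &&
      ((ls.reverse.takeWhile (fun l => !pvEmptyHdrC l)).reverse.takeWhile
        (fun l => l.take 3 != "## ".toList)).any (fun l => l.take 6 == "- [ ] ".toList))
    = pvBadC ls := by
  induction ls with
  | nil => rfl
  | cons l ls ih =>
    rw [List.any_cons, List.reverse_cons, List.takeWhile_append, pvBadC]
    by_cases hE : ls.any pvEmptyHdrC = true
    · have hstop : ¬ (ls.reverse.takeWhile (fun l => !pvEmptyHdrC l)).length = ls.reverse.length := by
        intro hc
        have hself : ls.reverse.takeWhile (fun l => !pvEmptyHdrC l) = ls.reverse :=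
          ((List.takeWhile_prefix _).eq_of_length hc)
        have hall := List.takeWhile_eq_self_iff.mp hself
        rw [List.any_eq_true] at hE
        obtain ⟨x, hx, hpx⟩ := hE
        have := hall x (List.mem_reverse.mpr hx)
        rw [hpx] at this
        simp at this
      rw [if_neg hstop, hE, Bool.or_true, Bool.true_and]
      rw [hE, Bool.true_and] at ih
      rw [ih]
      rw [if_neg (by simp)]
    · simp only [Bool.not_eq_true] at hE
      by_cases hel : pvEmptyHdrC l = true
      · have hall : ∀ x ∈ ls.reverse, (fun l => !pvEmptyHdrC l) x = true := by
          intro x hx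
          have h5 := List.any_eq_false.mp hE x (List.mem_reverse.mp hx)
          simpa using h5
        have hlen : (ls.reverse.takeWhile (fun l => !pvEmptyHdrC l)).length = ls.reverse.length := by
          rw [List.takeWhile_eq_self_iff.mpr hall]
        rw [if_pos hlen, hel, Bool.true_or, Bool.true_and]
        rw [List.takeWhile_cons, if_neg (by rw [hel]; simp), List.append_nil, List.reverse_reverse]
        rw [if_pos (by rw [hE]; simp)]
        exact (pvItemB4C_eq ls).symm
      · simp only [Bool.not_eq_true] at hel
        rw [hel, hE, Bool.or_self, Bool.false_and]
        rw [if_neg (by simp)]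
        exact (pvBadC_no_empty ls hE).symm

-- string-level views of the line shapes (proof layer) D_ talks about (input inspection only)
def pvHdr (l : String) : Bool := l.toList.take 3 == ['#', '#', ' ']
def pvEmptyHdr (l : String) : Bool :=
  pvHdr l && (l.toList.drop 3).all PySem.Chars.isspace
def pvItemLine (l : String) : Bool := l.toList.take 6 == ['-', ' ', '[', ' ', ']', ' ']
def pvHasEmpty (ls : List String) : Bool := ls.any pvEmptyHdr
-- is there a '- [ ] ' line before the next '## ' header?
def pvItemB4Hdr : List String → Bool
  | [] => false
  | l :: ls => if pvHdr l then false else pvItemLine l || pvItemB4Hdr ls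
-- does the LAST empty-named header have a checklist item in its block?
def pvBadLines : List String → Bool
  | [] => false
  | l :: ls => if pvEmptyHdr l && !pvHasEmpty ls then pvItemB4Hdr ls else pvBadLines ls

-- lines of the content, built structurally (newline-separated pieces)
def pvLines : List Char → List (List Char)
  | [] => [[]]
  | c :: cs =>
    if c = '\n' then [] :: pvLines cs
    else
      match pvLines cs with
      | [] => [[c]]
      | h :: t => (c :: h) :: t


theorem pvLines_ne_nil (cs : List Char) : pvLines cs ≠ [] := by
  cases cs with
  | nil => simp [pvLines]
  | cons c cs =>
    unfold pvLines
    by_cases h : c = '\n'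
    · simp [h]
    · simp only [h, if_false]
      cases pvLines cs <;> simp

theorem pvGo_spec : ∀ (fuel : Nat) (l cur : List Char) (acc : List (List Char)),
    l.length < fuel →
    PySem.Chars.splitOn.go ['\n'] fuel l cur acc
      = acc.reverse ++ (match pvLines l with
          | [] => [cur.reverse]
          | h :: t => (cur.reverse ++ h) :: t) := by
  intro fuel
  induction fuel with
  | zero => intro l cur acc h; omega
  | succ fuel ih =>
    intro l cur acc hlen
    cases l with
    | nil =>
      simp [PySem.Chars.splitOn.go, pvLines]
    | cons c rest =>
      by_cases hc : c = '\n'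
      · subst hc
        rw [show PySem.Chars.splitOn.go ['\n'] (fuel+1) ('\n' :: rest) cur acc
            = PySem.Chars.splitOn.go ['\n'] fuel rest [] (cur.reverse :: acc) from by
          simp [PySem.Chars.splitOn.go, List.isPrefixOf]]
        rw [ih _ _ _ (by simpa using Nat.lt_of_succ_lt_succ hlen)]
        cases hp : pvLines rest with
        | nil => exact absurd hp (pvLines_ne_nil rest)
        | cons h t =>
          simp [pvLines, hp]
      · rw [show PySem.Chars.splitOn.go ['\n'] (fuel+1) (c :: rest) cur acc
            = PySem.Chars.splitOn.go ['\n'] fuel rest (c :: cur) acc from by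
          simp [PySem.Chars.splitOn.go, List.isPrefixOf, Ne.symm hc]]
        rw [ih _ _ _ (by simpa using Nat.lt_of_succ_lt_succ hlen)]
        cases hp : pvLines rest with
        | nil => exact absurd hp (pvLines_ne_nil rest)
        | cons h t =>
          simp [pvLines, hc, hp]

theorem pvSplit_eq (content : String) :
    (PySem.Str.split? content "\n").getD [] = (pvLines content.toList).map String.ofList := by
  unfold PySem.Str.split? PySem.Chars.split?
  simp only [show ("\n" : String).toList = ['\n'] from rfl]
  rw [show (['\n'] : List Char).isEmpty = false from rfl]
  simp only [Bool.false_eq_true, if_false, Option.map_some, Option.getD_some]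
  unfold PySem.Chars.splitOn
  rw [pvGo_spec _ _ _ _ (Nat.lt_succ_self _)]
  cases hp : pvLines content.toList with
  | nil => exact absurd hp (pvLines_ne_nil _)
  | cons h t => simp

theorem splitOn_eq_pvLines (cs : List Char) : cs.splitOn '\n' = pvLines cs := by
  induction cs with
  | nil => rfl
  | cons c cs ih =>
    rw [List.splitOn, List.splitOnP_cons]
    rw [List.splitOn] at ih
    by_cases h : c = '\n'
    · simp [pvLines, h, ih]
    · simp only [pvLines, h, if_false, beq_iff_eq, ih]
      cases hp : pvLines cs with
      | nil => exact absurd hp (pvLines_ne_nil cs)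
      | cons a t => simp

theorem pvEmptyHdr_ofList (l : List Char) : pvEmptyHdr (String.ofList l) = pvEmptyHdrC l := by
  simp [pvEmptyHdr, pvEmptyHdrC, pvHdr,
    show ("## " : String).toList = ['#', '#', ' '] from rfl]

theorem pvItemB4_map (ls : List (List Char)) :
    pvItemB4Hdr (ls.map String.ofList) = pvItemB4C ls := by
  induction ls with
  | nil => rfl
  | cons l ls ih =>
    rw [List.map_cons, pvItemB4Hdr, pvItemB4C]
    simp only [show ("## " : String).toList = ['#', '#', ' '] from rfl,
      show ("- [ ] " : String).toList = ['-', ' ', '[', ' ', ']', ' '] from rfl]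
    by_cases h : (l.take 3 == ['#', '#', ' ']) = true
    · rw [if_pos (by simpa [pvHdr] using h)]
      simp [bne, h]
    · rw [if_neg (by simpa [pvHdr] using h), ih]
      simp only [Bool.not_eq_true] at h
      simp [pvItemLine, bne, h]

theorem pvHasEmpty_map (ls : List (List Char)) :
    pvHasEmpty (ls.map String.ofList) = ls.any pvEmptyHdrC := by
  induction ls with
  | nil => rfl
  | cons l ls ih =>
    simp only [pvHasEmpty] at ih ⊢
    rw [List.map_cons, List.any_cons, List.any_cons, pvEmptyHdr_ofList, ih]

theorem pvBad_map (ls : List (List Char)) :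
    pvBadLines (ls.map String.ofList) = pvBadC ls := by
  induction ls with
  | nil => rfl
  | cons l ls ih =>
    rw [List.map_cons, pvBadLines, pvBadC, pvEmptyHdr_ofList, pvHasEmpty_map, pvItemB4_map, ih]

theorem pvD_bridge (content : String) :
    pvBadLines ((PySem.Str.split? content "\n").getD []) = pvBadC (content.toList.splitOn '\n') := by
  rw [pvSplit_eq, pvBad_map, splitOn_eq_pvLines]

theorem pvD_iff (content : String) : D_parse_template_py content
    ↔ pvBadLines ((PySem.Str.split? content "\n").getD []) = true := by
  unfold D_parse_template_py
  rw [pvD_bridge, ← pvBadC_eq]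

-- bridges: the D_-layer line-shape predicates versus the ports' string primitives
theorem prefix_take_bridge (p s : List Char) : (s.take p.length == p) = p.isPrefixOf s := by
  rw [Bool.eq_iff_iff, beq_iff_eq, List.isPrefixOf_iff_prefix]
  constructor
  · intro h; exact List.prefix_iff_eq_take.mpr h.symm
  · intro h; exact (List.prefix_iff_eq_take.mp h).symm

theorem pvHdr_eq (l : String) : pvHdr l = PySem.Str.startswith l "## " := by
  simp only [PySem.Str.startswith_eq]
  rw [show pvHdr l = (l.toList.take 3 == ['#', '#', ' ']) from rfl]
  rw [show (3 : Nat) = (['#', '#', ' '] : List Char).length from rfl, prefix_take_bridge]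
  rfl

theorem pvItemLine_eq (l : String) : pvItemLine l = PySem.Str.startswith l "- [ ] " := by
  simp only [PySem.Str.startswith_eq]
  rw [show pvItemLine l = (l.toList.take 6 == ['-', ' ', '[', ' ', ']', ' ']) from rfl]
  rw [show (6 : Nat) = (['-', ' ', '[', ' ', ']', ' '] : List Char).length from rfl,
    prefix_take_bridge]
  rfl

theorem strip_nil_iff (cs : List Char) :
    (PySem.Chars.strip cs = []) ↔ (cs.all PySem.Chars.isspace = true) := by
  unfold PySem.Chars.strip PySem.Chars.rstrip PySem.Chars.lstrip
  rw [List.reverse_eq_nil_iff, List.dropWhile_eq_nil_iff]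
  simp only [List.mem_reverse]
  constructor
  · intro h
    rw [List.all_eq_true]
    intro x hx
    rw [← List.takeWhile_append_dropWhile (p := PySem.Chars.isspace) (l := cs)] at hx
    rcases List.mem_append.mp hx with h1 | h1
    · exact List.mem_takeWhile_imp h1
    · exact h x h1
  · intro h x hx
    rw [List.all_eq_true] at h
    exact h x (List.dropWhile_subset _ hx)

theorem pvEmptyHdr_eq (l : String) : pvEmptyHdr l
    = (PySem.Str.startswith l "## " && (PySem.Str.strip (PySem.Str.slice l (some 3) none) == "")) := by
  rw [show pvEmptyHdr l = (pvHdr l && (l.toList.drop 3).all PySem.Chars.isspace) from rfl]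
  rw [pvHdr_eq]
  by_cases hh : PySem.Str.startswith l "## " = true
  · rw [hh, Bool.true_and, Bool.true_and]
    rw [Bool.eq_iff_iff, beq_iff_eq]
    unfold PySem.Str.strip PySem.Str.slice
    rw [show PySem.Chars.slice l.toList (some 3) none = l.toList.drop 3 from by
      simp [PySem.Chars.slice, pysem]]
    simp only [String.toList_ofList]
    constructor
    · intro h
      rw [show ("" : String) = String.ofList [] from rfl]
      exact congrArg String.ofList ((strip_nil_iff _).mpr h)
    · intro h
      apply (strip_nil_iff _).mp
      have := congrArg String.toList h
      simpa using this
  · simp only [Bool.not_eq_true] at hh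
    rw [hh, Bool.false_and, Bool.false_and]

-- B's outer loop WITH A's quirk (empty names drop their items): proof-only bridge
def pvBGoS : List String → PySem.Dict String (List String) → PySem.Dict String (List String)
  | [], d => d
  | l :: ls, d =>
    if PySem.Str.startswith l "## " then
      let name := PySem.Str.strip (PySem.Str.slice l (some 3) none)
      let r := pvBInner ls []
      pvBGoS r.2 (d.insert name (if name ≠ "" then r.1 else []))
    else pvBGoS ls d
termination_by ls _ => ls.length
decreasing_by
  · exact Nat.lt_succ_of_le (pvBInner_len ls [])
  · exact Nat.lt_succ_self _

def pvNotHdr (l : String) : Bool := !(PySem.Str.startswith l "## ")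

def pvItemsOf (b : List String) : List String :=
  (b.filter (fun l => PySem.Str.startswith l "- [ ] ")).map
    (fun l => PySem.Str.strip (PySem.Str.slice l (some 6) none))

theorem pvBInner_spec : ∀ (ls items : List String),
    pvBInner ls items = (items ++ pvItemsOf (ls.takeWhile pvNotHdr), ls.dropWhile pvNotHdr) := by
  intro ls
  induction ls with
  | nil => intro items; simp [pvBInner, pvItemsOf]
  | cons l ls ih =>
    intro items
    by_cases h : PySem.Str.startswith l "## " = true
    · simp [pvBInner, h, pvNotHdr, pvItemsOf, -PySem.Str.startswith_eq]
    · simp only [Bool.not_eq_true] at h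
      by_cases hi : PySem.Str.startswith l "- [ ] " = true
      · simp [pvBInner, h, hi, pvNotHdr, pvItemsOf, ih, -PySem.Str.startswith_eq]
      · simp only [Bool.not_eq_true] at hi
        simp [pvBInner, h, hi, pvNotHdr, pvItemsOf, ih, -PySem.Str.startswith_eq]

theorem pvModify_insert (d : PySem.Dict String (List String)) (k : String) (v : List String)
    (d0 : List String) (f : List String → List String) :
    (d.insert k v).modify k d0 f = d.insert k (f v) := by
  simp [PySem.Dict.modify, pysem, PySem.Dict.insert_insert_self]

-- A's fold over a header-free block, truthy current section: appends the block's items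
theorem pvBody_fold (body : List String) (hb : ∀ l ∈ body, PySem.Str.startswith l "## " = false)
    (d : PySem.Dict String (List String)) (name : String) (hn : name ≠ "") :
    ∀ acc, body.foldl pvAStep (d.insert name acc, some name)
      = (d.insert name (acc ++ pvItemsOf body), some name) := by
  induction body with
  | nil => intro acc; simp [pvItemsOf]
  | cons l body ih =>
    intro acc
    have hl : PySem.Str.startswith l "## " = false := hb l (List.mem_cons_self ..)
    have hb' : ∀ l' ∈ body, PySem.Str.startswith l' "## " = false :=
      fun l' h' => hb l' (List.mem_cons_of_mem _ h')
    by_cases hi : PySem.Str.startswith l "- [ ] " = true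
    · have : pvAStep (d.insert name acc, some name) l
          = (d.insert name (acc ++ [PySem.Str.strip (PySem.Str.slice l (some 6) none)]), some name) := by
        simp [pvAStep, hl, hi, pvTruthy, hn, pvModify_insert, -PySem.Str.startswith_eq]
      rw [List.foldl_cons, this, ih hb']
      simp [pvItemsOf, hi, List.append_assoc, -PySem.Str.startswith_eq]
    · simp only [Bool.not_eq_true] at hi
      have : pvAStep (d.insert name acc, some name) l = (d.insert name acc, some name) := by
        simp [pvAStep, hl, hi, -PySem.Str.startswith_eq]
      rw [List.foldl_cons, this, ih hb']
      simp [pvItemsOf, hi, -PySem.Str.startswith_eq]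

-- A's fold over a header-free block with a falsy current section: no change
theorem pvBody_fold_falsy (body : List String) (hb : ∀ l ∈ body, PySem.Str.startswith l "## " = false)
    (d : PySem.Dict String (List String)) (cur : Option String) (hc : pvTruthy cur = false) :
    body.foldl pvAStep (d, cur) = (d, cur) := by
  induction body with
  | nil => rfl
  | cons l body ih =>
    have hl : PySem.Str.startswith l "## " = false := hb l (List.mem_cons_self ..)
    have : pvAStep (d, cur) l = (d, cur) := by simp [pvAStep, hl, hc, -PySem.Str.startswith_eq]
    rw [List.foldl_cons, this, ih (fun l' h' => hb l' (List.mem_cons_of_mem _ h'))]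

-- the core invariant: whenever the current section is falsy, or the remaining lines
-- start at a header boundary, A's fold and pvBGoS build the same dict
theorem pvCore : ∀ (n : Nat) (lines : List String) (d : PySem.Dict String (List String))
    (cur : Option String), lines.length ≤ n →
    (pvTruthy cur = false ∨ lines = [] ∨ ∃ l ls, lines = l :: ls ∧ PySem.Str.startswith l "## " = true) →
    (lines.foldl pvAStep (d, cur)).1 = pvBGoS lines d := by
  intro n
  induction n with
  | zero =>
    intro lines d cur hlen _
    have : lines = [] := List.eq_nil_of_length_eq_zero (Nat.le_zero.mp hlen)
    subst this; simp [pvBGoS]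
  | succ n ih =>
    intro lines d cur hlen hok
    cases lines with
    | nil => simp [pvBGoS]
    | cons l ls =>
      by_cases hh : PySem.Str.startswith l "## " = true
      · set name := PySem.Str.strip (PySem.Str.slice l (some 3) none) with hname
        have hstep : pvAStep (d, cur) l = (d.insert name [], some name) := by
          simp [pvAStep, hh, hname, -PySem.Str.startswith_eq]
        have hsplit : ls = ls.takeWhile pvNotHdr ++ ls.dropWhile pvNotHdr :=
          (List.takeWhile_append_dropWhile).symm
        have hbodyH : ∀ x ∈ ls.takeWhile pvNotHdr, PySem.Str.startswith x "## " = false := by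
          intro x hx
          have := List.mem_takeWhile_imp hx
          simpa [pvNotHdr] using this
        have hlen' : (ls.dropWhile pvNotHdr).length ≤ n := by
          have h1 : (ls.dropWhile pvNotHdr).length ≤ ls.length := List.length_dropWhile_le ..
          have h2 : ls.length ≤ n := by simpa using Nat.le_of_succ_le_succ hlen
          omega
        have hok' : pvTruthy (some name) = false ∨ ls.dropWhile pvNotHdr = [] ∨
            ∃ l' ls', ls.dropWhile pvNotHdr = l' :: ls' ∧ PySem.Str.startswith l' "## " = true := by
          cases hrest : ls.dropWhile pvNotHdr with
          | nil => exact Or.inr (Or.inl rfl)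
          | cons r rs =>
            refine Or.inr (Or.inr ⟨r, rs, rfl, ?_⟩)
            have := List.head?_dropWhile_not pvNotHdr ls
            rw [hrest] at this
            simpa [pvNotHdr] using this
        have hBinner := pvBInner_spec ls []
        rw [List.foldl_cons, hstep]
        conv_lhs => rw [hsplit, List.foldl_append]
        by_cases hn : name = ""
        · rw [pvBody_fold_falsy _ hbodyH _ _ (by simp [pvTruthy, hn])]
          rw [ih _ _ _ hlen' (Or.inl (by simp [pvTruthy, hn]))]
          show pvBGoS _ _ = pvBGoS (l :: ls) d
          rw [pvBGoS]
          simp only [hh, hBinner, if_true]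
          rw [← hname]
          simp [hn]
        · rw [show (d.insert name [] : PySem.Dict String (List String))
              = d.insert name ([] : List String) from rfl]
          rw [pvBody_fold _ hbodyH d name hn []]
          rw [ih _ _ _ hlen' (by
            rcases hok' with h | h | h
            · simp [pvTruthy, hn] at h
            · exact Or.inr (Or.inl h)
            · exact Or.inr (Or.inr h))]
          show pvBGoS _ _ = pvBGoS (l :: ls) d
          rw [pvBGoS]
          simp only [hh, hBinner, if_true]
          rw [← hname]
          simp [hn]
      · have hc : pvTruthy cur = false := by
          rcases hok with h | h | ⟨l', ls', heq, hl'⟩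
          · exact h
          · exact absurd h (by simp)
          · cases heq; exact absurd hl' hh
        have hstep : pvAStep (d, cur) l = (d, cur) := by
          simp only [Bool.not_eq_true] at hh
          simp [pvAStep, hh, hc, -PySem.Str.startswith_eq]
        rw [List.foldl_cons, hstep,
          ih ls d cur (by simpa using Nat.le_of_succ_le_succ hlen) (Or.inl hc)]
        rw [pvBGoS]
        simp [hh, -PySem.Str.startswith_eq]


-- insert at two distinct keys commutes when the first key is already present
theorem pvInsertComm (d : PySem.Dict String (List String)) (k k' : String)
    (h : d.contains k = true) (hne : k ≠ k') (w v : List String) :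
    (d.insert k w).insert k' v = (d.insert k' v).insert k w := by
  apply PySem.Dict.ext
  by_cases hc : d.contains k' = true
  · simp [PySem.Dict.items_insert, PySem.Dict.contains_insert, hc, h]
    intro a b _
    by_cases h1 : a = k <;> by_cases h2 : a = k' <;> simp_all
  · simp [PySem.Dict.items_insert, PySem.Dict.contains_insert, hc, h, Ne.symm hne,
      List.map_append]

-- header-free prefixes are transparent to the line-shape scanners
theorem pvEmptyHdr_false_of_not_hdr (x : String) (hx : pvHdr x = false) :
    pvEmptyHdr x = false := by
  unfold pvEmptyHdr
  rw [hx, Bool.false_and]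

theorem pvHasEmpty_cons (x : String) (ls : List String) :
    pvHasEmpty (x :: ls) = (pvEmptyHdr x || pvHasEmpty ls) := rfl

theorem pvHasEmpty_append (body rest : List String) (hb : ∀ x ∈ body, pvHdr x = false) :
    pvHasEmpty (body ++ rest) = pvHasEmpty rest := by
  induction body with
  | nil => rfl
  | cons x body ih =>
    have hex : pvEmptyHdr x = false :=
      pvEmptyHdr_false_of_not_hdr x (hb x (List.mem_cons_self ..))
    rw [List.cons_append, pvHasEmpty_cons, hex, Bool.false_or]
    exact ih (fun x' h' => hb x' (List.mem_cons_of_mem _ h'))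

theorem pvBad_append (body rest : List String) (hb : ∀ x ∈ body, pvHdr x = false) :
    pvBadLines (body ++ rest) = pvBadLines rest := by
  induction body with
  | nil => rfl
  | cons x body ih =>
    have hex : pvEmptyHdr x = false :=
      pvEmptyHdr_false_of_not_hdr x (hb x (List.mem_cons_self ..))
    rw [List.cons_append, pvBadLines, hex, Bool.false_and]
    simp only [Bool.false_eq_true, if_false]
    exact ih (fun x' h' => hb x' (List.mem_cons_of_mem _ h'))

theorem pvBad_of_not_hasEmpty (ls : List String) (h : pvHasEmpty ls = false) :
    pvBadLines ls = false := by
  induction ls with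
  | nil => rfl
  | cons l ls ih =>
    rw [pvHasEmpty_cons, Bool.or_eq_false_iff] at h
    rw [pvBadLines, h.1, Bool.false_and]
    simp only [Bool.false_eq_true, if_false]
    exact ih h.2

theorem pvBad_of_hasEmpty_true (ls : List String) (h : pvBadLines ls = true) :
    pvHasEmpty ls = true := by
  induction ls with
  | nil => simp [pvBadLines] at h
  | cons l ls ih =>
    by_cases he : pvEmptyHdr l = true
    · rw [pvHasEmpty_cons, he, Bool.true_or]
    · simp only [Bool.not_eq_true] at he
      rw [pvBadLines, he, Bool.false_and] at h
      simp only [Bool.false_eq_true, if_false] at h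
      rw [pvHasEmpty_cons, ih h, Bool.or_true]

-- no '- [ ] ' line before the next header ↔ the block contributes no items
theorem pvItemsOf_cons (l : String) (ls : List String) :
    pvItemsOf (l :: ls) = (if PySem.Str.startswith l "- [ ] " = true
      then [PySem.Str.strip (PySem.Str.slice l (some 6) none)] else []) ++ pvItemsOf ls := by
  unfold pvItemsOf
  rw [List.filter_cons]
  by_cases hi : PySem.Str.startswith l "- [ ] " = true
  · rw [if_pos hi, if_pos hi, List.map_cons, List.singleton_append]
  · rw [if_neg hi, if_neg hi, List.nil_append]

theorem pvItemsOf_take_nil (ls : List String) (h : pvItemB4Hdr ls = false) :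
    pvItemsOf (ls.takeWhile pvNotHdr) = [] := by
  induction ls with
  | nil => rfl
  | cons l ls ih =>
    by_cases hh : pvHdr l = true
    · rw [List.takeWhile_cons_of_neg (by simp only [pvNotHdr]; rw [← pvHdr_eq]; simpa using hh)]
      rfl
    · rw [pvItemB4Hdr, if_neg (by simpa using hh), Bool.or_eq_false_iff] at h
      simp only [Bool.not_eq_true] at hh
      rw [List.takeWhile_cons_of_pos (by simp only [pvNotHdr]; rw [← pvHdr_eq]; simpa using hh)]
      rw [pvItemsOf_cons, if_neg (by rw [← pvItemLine_eq]; simpa using h.1), List.nil_append]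
      exact ih h.2

theorem pvItemsOf_take_ne_nil (ls : List String) (h : pvItemB4Hdr ls = true) :
    pvItemsOf (ls.takeWhile pvNotHdr) ≠ [] := by
  induction ls with
  | nil => simp [pvItemB4Hdr] at h
  | cons l ls ih =>
    by_cases hh : pvHdr l = true
    · rw [pvItemB4Hdr, if_pos hh] at h
      exact absurd h (by simp)
    · rw [pvItemB4Hdr, if_neg hh, Bool.or_eq_true] at h
      simp only [Bool.not_eq_true] at hh
      rw [List.takeWhile_cons_of_pos (by simp only [pvNotHdr]; rw [← pvHdr_eq]; simpa using hh)]
      rw [pvItemsOf_cons]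
      by_cases hi : PySem.Str.startswith l "- [ ] " = true
      · rw [if_pos hi]; simp
      · rw [if_neg hi, List.nil_append]
        refine ih (h.resolve_left ?_)
        simp only [Bool.not_eq_true] at hi
        rw [pvItemLine_eq]
        simpa using hi

-- the main bridge: with no offending last empty-name block, the quirky and the
-- natural outer loops agree (d2 tracks d1 up to the value stored at key "")
theorem pvMain : ∀ (n : Nat) (lines : List String) (d1 d2 : PySem.Dict String (List String)),
    lines.length ≤ n → pvBadLines lines = false →
    (d2 = d1 ∨ (d1.contains "" = true ∧ (∃ w, d2 = d1.insert "" w) ∧ pvHasEmpty lines = true)) →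
    pvBGoS lines d1 = pvBGo lines d2 := by
  intro n
  induction n with
  | zero =>
    intro lines d1 d2 hlen _ hinv
    have : lines = [] := List.eq_nil_of_length_eq_zero (Nat.le_zero.mp hlen)
    subst this
    rcases hinv with h | ⟨_, _, he⟩
    · subst h; simp [pvBGoS, pvBGo]
    · simp [pvHasEmpty] at he
  | succ n ih =>
    intro lines d1 d2 hlen hbad hinv
    cases lines with
    | nil =>
      rcases hinv with h | ⟨_, _, he⟩
      · subst h; simp [pvBGoS, pvBGo]
      · simp [pvHasEmpty] at he
    | cons l ls =>
      by_cases hh : PySem.Str.startswith l "## " = true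
      · have hbodyH : ∀ x ∈ ls.takeWhile pvNotHdr, pvHdr x = false := by
          intro x hx
          have := List.mem_takeWhile_imp hx
          rw [pvHdr_eq]
          simpa [pvNotHdr] using this
        have hsplit : ls = ls.takeWhile pvNotHdr ++ ls.dropWhile pvNotHdr :=
          (List.takeWhile_append_dropWhile).symm
        have hlen' : (ls.dropWhile pvNotHdr).length ≤ n := by
          have h1 : (ls.dropWhile pvNotHdr).length ≤ ls.length := List.length_dropWhile_le ..
          have h2 : ls.length ≤ n := by simpa using Nat.le_of_succ_le_succ hlen
          omega
        have hEls : pvHasEmpty ls = pvHasEmpty (ls.dropWhile pvNotHdr) := by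
          conv_lhs => rw [hsplit]
          exact pvHasEmpty_append _ _ hbodyH
        have hBls : pvBadLines ls = pvBadLines (ls.dropWhile pvNotHdr) := by
          conv_lhs => rw [hsplit]
          exact pvBad_append _ _ hbodyH
        rw [pvBGoS, pvBGo]
        simp only [hh, if_true, pvBInner_spec ls []]
        by_cases hn : PySem.Str.strip (PySem.Str.slice l (some 3) none) = ""
        · -- empty-name header
          have hEl : pvEmptyHdr l = true := by
            rw [pvEmptyHdr_eq, hh, hn, Bool.true_and, beq_self_eq_true]
          rw [hn]
          simp only [ne_eq, not_true_eq_false, if_false, List.nil_append]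
          by_cases hE : pvHasEmpty ls = true
          · -- a later empty header exists: stay in the tracking branch
            have hbad' : pvBadLines ls = false := by
              rw [pvBadLines, hEl, hE] at hbad
              simpa using hbad
            rcases hinv with h | ⟨hc1, ⟨w, hw⟩, _⟩
            · subst h
              refine ih _ _ _ hlen' (hBls ▸ hbad') (Or.inr ⟨?_, ⟨pvItemsOf (List.takeWhile pvNotHdr ls), ?_⟩, hEls ▸ hE⟩)
              · exact PySem.Dict.contains_insert_self ..
              · rw [PySem.Dict.insert_insert_self]
            · subst hw
              rw [PySem.Dict.insert_insert_self]
              refine ih _ _ _ hlen' (hBls ▸ hbad') (Or.inr ⟨?_, ⟨pvItemsOf (List.takeWhile pvNotHdr ls), ?_⟩, hEls ▸ hE⟩)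
              · exact PySem.Dict.contains_insert_self ..
              · rw [PySem.Dict.insert_insert_self]
          · -- this is the LAST empty header: its block has no items, both store []
            simp only [Bool.not_eq_true] at hE
            have hit : pvItemB4Hdr ls = false := by
              rw [pvBadLines, hEl, hE] at hbad
              simpa using hbad
            have hnil : pvItemsOf (ls.takeWhile pvNotHdr) = [] := pvItemsOf_take_nil _ hit
            have hbad' : pvBadLines (ls.dropWhile pvNotHdr) = false := by
              rw [← hBls]; exact pvBad_of_not_hasEmpty _ hE
            rw [hnil]
            rcases hinv with h | ⟨hc1, ⟨w, hw⟩, _⟩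
            · subst h
              exact ih _ _ _ hlen' hbad' (Or.inl rfl)
            · subst hw
              rw [PySem.Dict.insert_insert_self]
              exact ih _ _ _ hlen' hbad' (Or.inl rfl)
        · -- non-empty name: both store the block's items
          have hEl : pvEmptyHdr l = false := by
            rw [pvEmptyHdr_eq, hh, Bool.true_and]
            simpa using hn
          have hbad' : pvBadLines ls = false := by
            rw [pvBadLines, hEl] at hbad
            simpa using hbad
          rw [if_pos (by simpa using hn), List.nil_append]
          rcases hinv with h | ⟨hc1, ⟨w, hw⟩, hE⟩
          · subst h
            exact ih _ _ _ hlen' (hBls ▸ hbad') (Or.inl rfl)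
          · subst hw
            have hE' : pvHasEmpty ls = true := by
              rw [pvHasEmpty_cons, hEl, Bool.false_or] at hE
              exact hE
            rw [pvInsertComm d1 "" _ hc1 (fun he => hn he.symm) w _]
            refine ih _ _ _ hlen' (hBls ▸ hbad') (Or.inr ⟨?_, ⟨w, rfl⟩, hEls ▸ hE'⟩)
            rw [PySem.Dict.contains_insert, hc1, Bool.or_true]
      · -- not a header: both loops skip the line
        have hEl : pvEmptyHdr l = false := by
          simp only [Bool.not_eq_true] at hh
          rw [pvEmptyHdr_eq, hh, Bool.false_and]
        have hbad' : pvBadLines ls = false := by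
          rw [pvBadLines, hEl] at hbad
          simpa using hbad
        have hinv' : d2 = d1 ∨ (d1.contains "" = true ∧ (∃ w, d2 = d1.insert "" w) ∧ pvHasEmpty ls = true) := by
          rcases hinv with h | ⟨hc1, hw, hE⟩
          · exact Or.inl h
          · refine Or.inr ⟨hc1, hw, ?_⟩
            rw [pvHasEmpty_cons, hEl, Bool.false_or] at hE
            exact hE
        rw [pvBGoS, pvBGo]
        simp only [hh, Bool.false_eq_true, if_false]
        exact ih _ _ _ (by simpa using Nat.le_of_succ_le_succ hlen) hbad' hinv'


-- lookups at key "" through the two outer loops (for the tightness claim)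
theorem pvBGoS_get_none : ∀ (n : Nat) (lines : List String) (d : PySem.Dict String (List String)),
    lines.length ≤ n → pvHasEmpty lines = false →
    (pvBGoS lines d).get? "" = d.get? "" := by
  intro n
  induction n with
  | zero =>
    intro lines d hlen _
    have : lines = [] := List.eq_nil_of_length_eq_zero (Nat.le_zero.mp hlen)
    subst this; simp [pvBGoS]
  | succ n ih =>
    intro lines d hlen hE
    cases lines with
    | nil => simp [pvBGoS]
    | cons l ls =>
      rw [pvHasEmpty_cons, Bool.or_eq_false_iff] at hE
      by_cases hh : PySem.Str.startswith l "## " = true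
      · have hbodyH : ∀ x ∈ ls.takeWhile pvNotHdr, pvHdr x = false := by
          intro x hx
          have := List.mem_takeWhile_imp hx
          rw [pvHdr_eq]
          simpa [pvNotHdr] using this
        have hlen' : (ls.dropWhile pvNotHdr).length ≤ n := by
          have h1 : (ls.dropWhile pvNotHdr).length ≤ ls.length := List.length_dropWhile_le ..
          have h2 : ls.length ≤ n := by simpa using Nat.le_of_succ_le_succ hlen
          omega
        have hEd : pvHasEmpty (ls.dropWhile pvNotHdr) = false := by
          have h0 := pvHasEmpty_append _ (ls.dropWhile pvNotHdr) hbodyH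
          rw [List.takeWhile_append_dropWhile] at h0
          rw [← h0]; exact hE.2
        have hn : ¬ PySem.Str.strip (PySem.Str.slice l (some 3) none) = "" := by
          intro hc
          have : pvEmptyHdr l = true := by
            rw [pvEmptyHdr_eq, hh, hc, Bool.true_and, beq_self_eq_true]
          rw [this] at hE
          exact absurd hE.1 (by simp)
        rw [pvBGoS]
        simp only [hh, if_true, pvBInner_spec ls []]
        rw [ih _ _ hlen' hEd, PySem.Dict.get?_insert_of_ne _ _ (fun he => hn he.symm)]
      · rw [pvBGoS]
        simp only [hh, Bool.false_eq_true, if_false]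
        exact ih _ _ (by simpa using Nat.le_of_succ_le_succ hlen) hE.2

theorem pvBGo_get_none : ∀ (n : Nat) (lines : List String) (d : PySem.Dict String (List String)),
    lines.length ≤ n → pvHasEmpty lines = false →
    (pvBGo lines d).get? "" = d.get? "" := by
  intro n
  induction n with
  | zero =>
    intro lines d hlen _
    have : lines = [] := List.eq_nil_of_length_eq_zero (Nat.le_zero.mp hlen)
    subst this; simp [pvBGo]
  | succ n ih =>
    intro lines d hlen hE
    cases lines with
    | nil => simp [pvBGo]
    | cons l ls =>
      rw [pvHasEmpty_cons, Bool.or_eq_false_iff] at hE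
      by_cases hh : PySem.Str.startswith l "## " = true
      · have hbodyH : ∀ x ∈ ls.takeWhile pvNotHdr, pvHdr x = false := by
          intro x hx
          have := List.mem_takeWhile_imp hx
          rw [pvHdr_eq]
          simpa [pvNotHdr] using this
        have hlen' : (ls.dropWhile pvNotHdr).length ≤ n := by
          have h1 : (ls.dropWhile pvNotHdr).length ≤ ls.length := List.length_dropWhile_le ..
          have h2 : ls.length ≤ n := by simpa using Nat.le_of_succ_le_succ hlen
          omega
        have hEd : pvHasEmpty (ls.dropWhile pvNotHdr) = false := by
          have h0 := pvHasEmpty_append _ (ls.dropWhile pvNotHdr) hbodyH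
          rw [List.takeWhile_append_dropWhile] at h0
          rw [← h0]; exact hE.2
        have hn : ¬ PySem.Str.strip (PySem.Str.slice l (some 3) none) = "" := by
          intro hc
          have : pvEmptyHdr l = true := by
            rw [pvEmptyHdr_eq, hh, hc, Bool.true_and, beq_self_eq_true]
          rw [this] at hE
          exact absurd hE.1 (by simp)
        rw [pvBGo]
        simp only [hh, if_true, pvBInner_spec ls []]
        rw [ih _ _ hlen' hEd, PySem.Dict.get?_insert_of_ne _ _ (fun he => hn he.symm)]
      · rw [pvBGo]
        simp only [hh, Bool.false_eq_true, if_false]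
        exact ih _ _ (by simpa using Nat.le_of_succ_le_succ hlen) hE.2

-- A's loop always leaves [] under the empty section name …
theorem pvBGoS_get_empty : ∀ (n : Nat) (lines : List String) (d : PySem.Dict String (List String)),
    lines.length ≤ n → pvHasEmpty lines = true →
    (pvBGoS lines d).get? "" = some [] := by
  intro n
  induction n with
  | zero =>
    intro lines d hlen hE
    have : lines = [] := List.eq_nil_of_length_eq_zero (Nat.le_zero.mp hlen)
    subst this; simp [pvHasEmpty] at hE
  | succ n ih =>
    intro lines d hlen hE
    cases lines with
    | nil => simp [pvHasEmpty] at hE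
    | cons l ls =>
      by_cases hh : PySem.Str.startswith l "## " = true
      · have hbodyH : ∀ x ∈ ls.takeWhile pvNotHdr, pvHdr x = false := by
          intro x hx
          have := List.mem_takeWhile_imp hx
          rw [pvHdr_eq]
          simpa [pvNotHdr] using this
        have hlen' : (ls.dropWhile pvNotHdr).length ≤ n := by
          have h1 : (ls.dropWhile pvNotHdr).length ≤ ls.length := List.length_dropWhile_le ..
          have h2 : ls.length ≤ n := by simpa using Nat.le_of_succ_le_succ hlen
          omega
        have hEls : pvHasEmpty ls = pvHasEmpty (ls.dropWhile pvNotHdr) := by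
          conv_lhs => rw [← List.takeWhile_append_dropWhile (p := pvNotHdr) (l := ls)]
          exact pvHasEmpty_append _ _ hbodyH
        rw [pvBGoS]
        simp only [hh, if_true, pvBInner_spec ls []]
        by_cases hEd : pvHasEmpty (ls.dropWhile pvNotHdr) = true
        · exact ih _ _ hlen' hEd
        · simp only [Bool.not_eq_true] at hEd
          have hn : PySem.Str.strip (PySem.Str.slice l (some 3) none) = "" := by
            rw [pvHasEmpty_cons, hEls, hEd, Bool.or_false] at hE
            rw [pvEmptyHdr_eq, hh, Bool.true_and] at hE
            exact eq_of_beq hE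
          rw [List.nil_append, pvBGoS_get_none _ _ _ hlen' hEd, hn]
          simp only [ne_eq, not_true_eq_false, if_false]
          exact PySem.Dict.get?_insert_self ..
      · rw [pvBGoS]
        simp only [hh, Bool.false_eq_true, if_false]
        have hEl : pvEmptyHdr l = false := by
          simp only [Bool.not_eq_true] at hh
          rw [pvEmptyHdr_eq, hh, Bool.false_and]
        rw [pvHasEmpty_cons, hEl, Bool.false_or] at hE
        exact ih _ _ (by simpa using Nat.le_of_succ_le_succ hlen) hE

-- … while on a D_ input B's loop leaves the (non-empty) items of the last block there
theorem pvBGo_get_bad : ∀ (n : Nat) (lines : List String) (d : PySem.Dict String (List String)),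
    lines.length ≤ n → pvBadLines lines = true →
    ∃ v, (pvBGo lines d).get? "" = some v ∧ v ≠ [] := by
  intro n
  induction n with
  | zero =>
    intro lines d hlen hB
    have : lines = [] := List.eq_nil_of_length_eq_zero (Nat.le_zero.mp hlen)
    subst this; simp [pvBadLines] at hB
  | succ n ih =>
    intro lines d hlen hB
    cases lines with
    | nil => simp [pvBadLines] at hB
    | cons l ls =>
      by_cases hh : PySem.Str.startswith l "## " = true
      · have hbodyH : ∀ x ∈ ls.takeWhile pvNotHdr, pvHdr x = false := by
          intro x hx
          have := List.mem_takeWhile_imp hx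
          rw [pvHdr_eq]
          simpa [pvNotHdr] using this
        have hlen' : (ls.dropWhile pvNotHdr).length ≤ n := by
          have h1 : (ls.dropWhile pvNotHdr).length ≤ ls.length := List.length_dropWhile_le ..
          have h2 : ls.length ≤ n := by simpa using Nat.le_of_succ_le_succ hlen
          omega
        have hBls : pvBadLines ls = pvBadLines (ls.dropWhile pvNotHdr) := by
          conv_lhs => rw [← List.takeWhile_append_dropWhile (p := pvNotHdr) (l := ls)]
          exact pvBad_append _ _ hbodyH
        have hEls : pvHasEmpty ls = pvHasEmpty (ls.dropWhile pvNotHdr) := by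
          conv_lhs => rw [← List.takeWhile_append_dropWhile (p := pvNotHdr) (l := ls)]
          exact pvHasEmpty_append _ _ hbodyH
        rw [pvBGo]
        simp only [hh, if_true, pvBInner_spec ls []]
        by_cases hE : pvHasEmpty ls = true
        · -- the offending empty header is further on
          have hB' : pvBadLines ls = true := by
            rw [pvBadLines] at hB
            by_cases he : pvEmptyHdr l = true
            · rw [he, hE] at hB
              simpa using hB
            · simp only [Bool.not_eq_true] at he
              rw [he, Bool.false_and] at hB
              simpa using hB
          exact ih _ _ hlen' (hBls ▸ hB')
        · -- l is the LAST empty header and its block has an item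
          simp only [Bool.not_eq_true] at hE
          have hel : pvEmptyHdr l = true := by
            by_cases he : pvEmptyHdr l = true
            · exact he
            · simp only [Bool.not_eq_true] at he
              rw [pvBadLines, he, Bool.false_and] at hB
              simp only [Bool.false_eq_true, if_false] at hB
              rw [pvBad_of_not_hasEmpty _ hE] at hB
              exact absurd hB (by simp)
          have hit : pvItemB4Hdr ls = true := by
            rw [pvBadLines, hel, hE] at hB
            simpa using hB
          have hn : PySem.Str.strip (PySem.Str.slice l (some 3) none) = "" := by
            rw [pvEmptyHdr_eq, hh, Bool.true_and] at hel
            exact eq_of_beq hel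
          have hEd : pvHasEmpty (ls.dropWhile pvNotHdr) = false := hEls ▸ hE
          rw [List.nil_append, pvBGo_get_none _ _ _ hlen' hEd, hn,
            PySem.Dict.get?_insert_self]
          exact ⟨_, rfl, pvItemsOf_take_ne_nil _ hit⟩
      · have hEl : pvEmptyHdr l = false := by
          simp only [Bool.not_eq_true] at hh
          rw [pvEmptyHdr_eq, hh, Bool.false_and]
        have hB' : pvBadLines ls = true := by
          rw [pvBadLines, hEl, Bool.false_and] at hB
          simpa using hB
        rw [pvBGo]
        simp only [hh, Bool.false_eq_true, if_false]
        exact ih _ _ (by simpa using Nat.le_of_succ_le_succ hlen) hB'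

-- ===== VERDICT (by name: the statements are the Claim_ definitions above) =====
theorem parse_template_py_spec : Claim_unchanged_parse_template_py := by
  intro content _ hnd
  show parse_template_py content = parse_template_py_alt content
  unfold parse_template_py parse_template_py_alt
  rw [pvCore (((PySem.Str.split? content "\n").getD []).length) _ PySem.Dict.empty none
    (Nat.le_refl _) (Or.inl rfl)]
  rw [pvMain (((PySem.Str.split? content "\n").getD []).length) _ PySem.Dict.empty
    PySem.Dict.empty (Nat.le_refl _) (by
      cases h : pvBadLines ((PySem.Str.split? content "\n").getD [])
      · rfl
      · exact absurd ((pvD_iff content).mpr h) hnd) (Or.inl rfl)]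

theorem parse_template_py_changed : Claim_changed_parse_template_py := by
  unfold Claim_changed_parse_template_py
  refine ⟨by decide, by decide, by decide, ?_, by decide⟩
  show parse_template_py_alt "## \n- [ ] x" = [("", ["x"])]
  simp only [parse_template_py_alt]
  rw [show (PySem.Str.split? "## \n- [ ] x" "\n").getD [] = ["## ", "- [ ] x"] by decide]
  simp only [pvBGo, pvBInner,
    show PySem.Str.startswith "## " "## " = true from by decide,
    show PySem.Str.startswith "- [ ] x" "## " = false from by decide,
    show PySem.Str.startswith "- [ ] x" "- [ ] " = true from by decide,
    if_true, if_false, Bool.false_eq_true]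
  decide

theorem parse_template_py_tight : Claim_exact_parse_template_py := by
  unfold Claim_exact_parse_template_py
  intro content _ hD heq
  have hA : parse_template_py content
      = (pvBGoS ((PySem.Str.split? content "\n").getD []) PySem.Dict.empty).items := by
    unfold parse_template_py
    rw [pvCore (((PySem.Str.split? content "\n").getD []).length) _ PySem.Dict.empty none
      (Nat.le_refl _) (Or.inl rfl)]
  have hDB : pvBadLines ((PySem.Str.split? content "\n").getD []) = true :=
    (pvD_iff content).mp hD
  have hdicts : pvBGoS ((PySem.Str.split? content "\n").getD []) PySem.Dict.empty
      = pvBGo ((PySem.Str.split? content "\n").getD []) PySem.Dict.empty := by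
    apply PySem.Dict.ext
    rw [← hA]
    exact heq
  have h1 := pvBGoS_get_empty (((PySem.Str.split? content "\n").getD []).length) _
    PySem.Dict.empty (Nat.le_refl _) (pvBad_of_hasEmpty_true _ hDB)
  obtain ⟨v, h2, hv⟩ := pvBGo_get_bad (((PySem.Str.split? content "\n").getD []).length) _
    PySem.Dict.empty (Nat.le_refl _) hDB
  rw [hdicts, h2] at h1
  exact hv (Option.some_injective _ h1)
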